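-- pv_equiv track=rewrite | github.com/Lefjav/kge-embeddings | src/data.py | _index_triples
-- ===== SOURCE A (Python) =====
-- def _index_triples(triples):
--     e2id, r2id = {}, {}
--     def _get(d, k):
--         if k not in d: d[k] = len(d)
--         return d[k]
--     id_triples = []
--     for h, r, t in triples:
--         id_triples.append((_get(e2id,h), _get(r2id,r), _get(e2id,t)))
--     return e2id, r2id, id_triples
-- ===== SOURCE B (Python) =====
-- def _index_triples(triples):
--     entities = list(dict.fromkeys(x for h, _, t in triples for x in (h, t)))
--     relations = list(dict.fromkeys(r for _, r, _ in triples))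
--     e2id = {e: i for i, e in enumerate(entities)}
--     r2id = {rel: i for i, rel in enumerate(relations)}
--     id_triples = [(e2id[h], r2id[r], e2id[t]) for h, r, t in triples]
--     return e2id, r2id, id_triples
-- ===== Notes on version B (the rewrite author's own statement) =====
-- stated objective: idiomatic
-- what changed: replaces the incremental get-or-assign dict helper with a declarative two-pass version: dedup via dict.fromkeys builds the ordered entity/relation lists, enumerate-comprehensions build the id maps, and a final comprehension does plain lookups
import Mathlib
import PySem

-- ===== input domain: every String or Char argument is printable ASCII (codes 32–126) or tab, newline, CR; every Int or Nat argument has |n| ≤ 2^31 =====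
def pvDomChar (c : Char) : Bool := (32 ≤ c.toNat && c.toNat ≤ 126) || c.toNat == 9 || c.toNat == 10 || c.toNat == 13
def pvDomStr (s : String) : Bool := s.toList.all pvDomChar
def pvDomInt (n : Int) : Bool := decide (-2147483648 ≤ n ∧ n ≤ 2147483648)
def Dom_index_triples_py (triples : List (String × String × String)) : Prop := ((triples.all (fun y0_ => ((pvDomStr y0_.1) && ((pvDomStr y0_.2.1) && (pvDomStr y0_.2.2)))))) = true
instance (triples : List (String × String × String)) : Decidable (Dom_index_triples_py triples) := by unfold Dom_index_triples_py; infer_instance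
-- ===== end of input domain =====

-- B replaces A's stateful get-or-assign helper by a declarative two-pass build (dedup + enumerate + lookups); same cost, more idiomatic.

-- ===== PORT A =====
-- _get(d, k): if k not in d: d[k] = len(d); return d[k]
def pvGetA (d : PySem.Dict String Int) (k : String) : PySem.Dict String Int × Int :=
  let d' := if d.contains k = false then d.insert k (d.size : Int) else d
  (d', d'.getD k 0)  -- key is present in d', so getD is exact for d'[k]

def pvStepA (st : PySem.Dict String Int × PySem.Dict String Int × List (Int × Int × Int))
    (tr : String × String × String) :
    PySem.Dict String Int × PySem.Dict String Int × List (Int × Int × Int) :=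
  let hi := pvGetA st.1 tr.1
  let ri := pvGetA st.2.1 tr.2.1
  let ti := pvGetA hi.1 tr.2.2
  (ti.1, ri.1, st.2.2 ++ [(hi.2, ri.2, ti.2)])

def index_triples_py (triples : List (String × String × String)) :
    (List (String × Int)) × (List (String × Int)) × (List (Int × Int × Int)) :=
  let st := triples.foldl pvStepA (PySem.Dict.empty, PySem.Dict.empty, [])
  (st.1.items, st.2.1.items, st.2.2)

-- ===== PORT B =====
-- {x: i for i, x in enumerate(l)}
def pvDictOf (l : List String) : PySem.Dict String Int :=
  (PySem.List.enumerate l 0).foldl (fun d p => d.insert p.2 p.1) PySem.Dict.empty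

def index_triples_py_alt (triples : List (String × String × String)) :
    (List (String × Int)) × (List (String × Int)) × (List (Int × Int × Int)) :=
  let entities := PySem.List.dedup (triples.flatMap (fun tr => [tr.1, tr.2.2]))
  let relations := PySem.List.dedup (triples.map (fun tr => tr.2.1))
  let e2id := pvDictOf entities
  let r2id := pvDictOf relations
  let idts := triples.map (fun tr => (e2id.getD tr.1 0, r2id.getD tr.2.1 0, e2id.getD tr.2.2 0))
  (e2id.items, r2id.items, idts)

-- ===== PRECONDITION & SPEC =====
def Spec_index_triples_py (triples : List (String × String × String)) (out : (List (String × Int)) × (List (String × Int)) × (List (Int × Int × Int))) : Prop := out = index_triples_py_alt triples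
instance (triples : List (String × String × String)) (out : (List (String × Int)) × (List (String × Int)) × (List (Int × Int × Int))) : Decidable (Spec_index_triples_py triples out) := by unfold Spec_index_triples_py; infer_instance

-- ===== CLAIM (what is proved, stated in full; the proofs are below) =====
def Claim_equal_index_triples_py : Prop := ∀ (triples : List (String × String × String)), Dom_index_triples_py triples → Spec_index_triples_py triples (index_triples_py triples)

-- ===== LEMMAS AND PROOFS =====
def pvE (ts : List (String × String × String)) : List String :=
  PySem.List.dedup (ts.flatMap (fun tr => [tr.1, tr.2.2]))
def pvR (ts : List (String × String × String)) : List String :=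
  PySem.List.dedup (ts.map (fun tr => tr.2.1))

theorem keys_pvDictOf (l : List String) : (pvDictOf l).keys = PySem.Set.ofList l := by
  unfold pvDictOf
  have h := PySem.Dict.keys_foldl_insert_key (ν := Int) (PySem.List.enumerate l)
    (fun p => p.2) (fun _ p => p.1) PySem.Dict.empty
  simpa [PySem.Dict.keys_empty, PySem.List.map_snd_enumerate] using h

theorem contains_pvDictOf (l : List String) (k : String) :
    (pvDictOf l).contains k = decide (k ∈ l) := by
  rw [PySem.Dict.contains_eq_decide_mem_keys, keys_pvDictOf]
  simp [PySem.Set.mem_ofList]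

theorem items_pvDictOf (l : List String) (hl : l.Nodup) :
    (pvDictOf l).items = (PySem.List.enumerate l 0).map (fun p => (p.2, p.1)) := by
  unfold pvDictOf
  have h := PySem.Dict.items_foldl_insert_fresh (PySem.List.enumerate l)
    (fun p => p.2) (fun p => p.1) PySem.Dict.empty
    (fun a _ => PySem.Dict.contains_empty _)
    (by rw [PySem.List.map_snd_enumerate]; exact hl)
  simpa using h

theorem size_pvDictOf (l : List String) (hl : l.Nodup) : (pvDictOf l).size = l.length := by
  simp [PySem.Dict.size, items_pvDictOf l hl, PySem.List.length_enumerate]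

theorem pvDictOf_append (l : List String) (k : String) :
    pvDictOf (l ++ [k]) = (pvDictOf l).insert k (l.length : Int) := by
  unfold pvDictOf
  rw [PySem.List.enumerate_append, List.foldl_append]
  simp [PySem.List.enumerate_cons, PySem.List.enumerate_nil]

theorem pvGetA_dictOf (l : List String) (hl : l.Nodup) (k : String) :
    pvGetA (pvDictOf l) k =
      (pvDictOf (PySem.Set.add l k), (pvDictOf (PySem.Set.add l k)).getD k 0) := by
  by_cases hm : k ∈ l
  · rw [PySem.Set.add_of_mem hm]
    simp [pvGetA, contains_pvDictOf, hm]
  · rw [PySem.Set.add_of_not_mem hm, pvDictOf_append]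
    simp [pvGetA, contains_pvDictOf, hm, size_pvDictOf l hl]

theorem getD_pvDictOf_add (l : List String) (_hl : l.Nodup) (k k' : String) (hk : k ∈ l) :
    (pvDictOf (PySem.Set.add l k')).getD k 0 = (pvDictOf l).getD k 0 := by
  by_cases hm : k' ∈ l
  · rw [PySem.Set.add_of_mem hm]
  · rw [PySem.Set.add_of_not_mem hm, pvDictOf_append, PySem.Dict.getD_insert_of_ne]
    intro h; exact hm (h ▸ hk)

theorem mem_pvE (ts : List (String × String × String)) (x : String × String × String)
    (hx : x ∈ ts) : x.1 ∈ pvE ts ∧ x.2.2 ∈ pvE ts := by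
  simp only [pvE, PySem.List.dedup_eq_ofList, PySem.Set.mem_ofList, List.mem_flatMap]
  exact ⟨⟨x, hx, by simp⟩, ⟨x, hx, by simp⟩⟩

theorem mem_pvR (ts : List (String × String × String)) (x : String × String × String)
    (hx : x ∈ ts) : x.2.1 ∈ pvR ts := by
  simp only [pvR, PySem.List.dedup_eq_ofList, PySem.Set.mem_ofList, List.mem_map]
  exact ⟨x, hx, rfl⟩

theorem nodup_pvE (ts : List (String × String × String)) : (pvE ts).Nodup := by
  simp only [pvE, PySem.List.dedup_eq_ofList]; exact PySem.Set.nodup_ofList _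

theorem nodup_pvR (ts : List (String × String × String)) : (pvR ts).Nodup := by
  simp only [pvR, PySem.List.dedup_eq_ofList]; exact PySem.Set.nodup_ofList _

theorem pvE_append (ts : List (String × String × String)) (tr : String × String × String) :
    pvE (ts ++ [tr]) = PySem.Set.add (PySem.Set.add (pvE ts) tr.1) tr.2.2 := by
  simp only [pvE, PySem.List.dedup_eq_ofList, List.flatMap_append, List.flatMap_cons,
    List.flatMap_nil, List.append_nil, PySem.Set.ofList_append, PySem.Set.update_cons,
    PySem.Set.update_nil]

theorem pvR_append (ts : List (String × String × String)) (tr : String × String × String) :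
    pvR (ts ++ [tr]) = PySem.Set.add (pvR ts) tr.2.1 := by
  simp only [pvR, PySem.List.dedup_eq_ofList, List.map_append, List.map_cons, List.map_nil,
    PySem.Set.ofList_append, PySem.Set.update_cons, PySem.Set.update_nil]

theorem foldA_spec (ts : List (String × String × String)) :
    ts.foldl pvStepA (PySem.Dict.empty, PySem.Dict.empty, []) =
      (pvDictOf (pvE ts), pvDictOf (pvR ts),
       ts.map (fun tr => ((pvDictOf (pvE ts)).getD tr.1 0,
                          (pvDictOf (pvR ts)).getD tr.2.1 0,
                          (pvDictOf (pvE ts)).getD tr.2.2 0))) := by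
  induction ts using List.reverseRecOn with
  | nil => rfl
  | append_singleton ts tr IH =>
    have hNE := nodup_pvE ts
    have hNR := nodup_pvR ts
    have hNE1 : (PySem.Set.add (pvE ts) tr.1).Nodup := PySem.Set.nodup_add _ _ hNE
    have h1 : tr.1 ∈ PySem.Set.add (pvE ts) tr.1 := by
      rw [PySem.Set.mem_add]; right; rfl
    rw [List.foldl_append, IH, List.foldl_cons, List.foldl_nil]
    simp only [pvStepA, pvGetA_dictOf _ hNE, pvGetA_dictOf _ hNR, pvGetA_dictOf _ hNE1,
      pvE_append, pvR_append, List.map_append, List.map_cons, List.map_nil]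
    refine congrArg _ (congrArg _ ?_)
    refine congrArg₂ _ ?_ ?_
    · apply List.map_congr_left
      intro x hx
      obtain ⟨hx1, hx2⟩ := mem_pvE ts x hx
      have hr := mem_pvR ts x hx
      rw [getD_pvDictOf_add _ hNE1 _ _ (by rw [PySem.Set.mem_add]; left; exact hx1),
          getD_pvDictOf_add _ hNE _ _ hx1,
          getD_pvDictOf_add _ hNE1 _ _ (by rw [PySem.Set.mem_add]; left; exact hx2),
          getD_pvDictOf_add _ hNE _ _ hx2,
          getD_pvDictOf_add _ hNR _ _ hr]
    · rw [getD_pvDictOf_add _ hNE1 _ _ h1]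

-- ===== VERDICT (by name: the statement is the Claim_ definition above) =====
theorem index_triples_py_spec : Claim_equal_index_triples_py := by
  intro ts _
  show index_triples_py ts = index_triples_py_alt ts
  simp only [index_triples_py, index_triples_py_alt, foldA_spec]
  rfl
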